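-- pv_equiv track=rewrite | github.com/RomanKondr/Subgraph-RAG-2.0-Motif-Driven-Retrieval-for-Knowledge-Intensive-Generation | reason/motif_rerank_scored_triples.py | eligible_nodes
-- ===== SOURCE A (Python) =====
-- from typing import Dict, List, Tuple, Any, Set
--
-- def eligible_nodes(adj: Dict[str, Set[str]], q: Set[str], hops: int) -> Set[str]:
--     q = {x for x in q if x}
--     if hops <= 0:
--         return q
--     out = set(q)
--     frontier = set(q)
--     for _ in range(hops):
--         nxt = set()
--         for u in frontier:
--             nxt.update(adj.get(u, ()))
--         nxt -= out
--         out |= nxt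
--         frontier = nxt
--         if not frontier:
--             break
--     return out
-- ===== SOURCE B (Python) =====
-- def eligible_nodes(adj, q, hops):
--     visited = {x for x in q if x}
--     if hops <= 0:
--         return visited
--     queue = [(u, 0) for u in visited]
--     i = 0
--     while i < len(queue):
--         u, d = queue[i]
--         i += 1
--         if d < hops:
--             for v in adj.get(u, ()):
--                 if v not in visited:
--                     visited.add(v)
--                     queue.append((v, d + 1))
--     return visited
-- ===== Notes on version B (the rewrite author's own statement) =====
-- stated objective: alternative
-- what changed: Replaces A's synchronized frontier-level expansion (per-round set union, set difference and frontier replacement) with a single FIFO queue of (node, depth) pairs, marking nodes visited at enqueue time, so no per-level set algebra is performed.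
import Mathlib
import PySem

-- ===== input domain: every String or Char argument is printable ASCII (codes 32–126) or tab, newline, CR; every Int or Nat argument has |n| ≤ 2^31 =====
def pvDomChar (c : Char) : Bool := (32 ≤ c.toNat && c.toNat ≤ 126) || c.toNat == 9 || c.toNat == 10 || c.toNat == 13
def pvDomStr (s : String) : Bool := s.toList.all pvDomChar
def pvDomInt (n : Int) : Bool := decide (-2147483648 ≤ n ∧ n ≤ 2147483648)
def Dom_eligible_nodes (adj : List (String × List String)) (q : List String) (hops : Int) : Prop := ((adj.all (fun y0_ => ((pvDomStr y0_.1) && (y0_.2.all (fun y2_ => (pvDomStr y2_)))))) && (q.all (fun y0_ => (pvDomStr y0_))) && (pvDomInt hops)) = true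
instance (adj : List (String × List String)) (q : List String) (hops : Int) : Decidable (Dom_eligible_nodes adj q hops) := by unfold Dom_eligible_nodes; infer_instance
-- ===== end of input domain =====

-- B replaces A's level-by-level frontier expansion (per-round set union/difference) with a single
-- FIFO queue of (node, depth) pairs, marking nodes visited at enqueue time (objective: alternative).
-- Both Pythons return a set; the ports return its elements in insertion order.

-- ===== PORT A =====
def loopA (adj : List (String × List String)) : Nat → List String → List String → List String
  | 0, out, _frontier => out
  | fuel + 1, out, frontier =>
      let nxt := frontier.foldl (fun s u => PySem.Set.update s (PySem.Dict.getD (PySem.Dict.mk adj) u [])) PySem.Set.empty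
      let nxt2 := PySem.Set.diff nxt out
      let out2 := PySem.Set.union out nxt2
      if nxt2.isEmpty then out2 else loopA adj fuel out2 nxt2

def eligible_nodes (adj : List (String × List String)) (q : List String) (hops : Int) : List String :=
  let q' := PySem.Set.ofList (q.filter (fun x => !(x == "")))
  if hops ≤ 0 then q' else loopA adj hops.toNat q' q'

-- ===== PORT B =====
-- one step of B's inner "for v in adj.get(u, ())" loop: state = (visited, pairs appended to the queue)
def bfsStep (d : Int) (p : List String × List (String × Int)) (v : String) : List String × List (String × Int) :=
  if p.1.contains v then p else (p.1 ++ [v], p.2 ++ [(v, d + 1)])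

-- fold characterisation, cited by loopB's termination proof
theorem add_prefix (ns vis : List String) : vis <+: ns.foldl PySem.Set.add vis := by
  induction ns generalizing vis with
  | nil => exact List.prefix_rfl
  | cons n ns ih =>
    simp only [List.foldl_cons]
    refine List.IsPrefix.trans ?_ (ih (PySem.Set.add vis n))
    by_cases h : n ∈ vis
    · simp [PySem.Set.add, h]
    · exact ⟨[n], by simp [PySem.Set.add, h]⟩

theorem foldl_bfsStep (d : Int) (ns vis : List String) (acc : List (String × Int)) :
    ns.foldl (bfsStep d) (vis, acc)
      = (ns.foldl PySem.Set.add vis,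
         acc ++ ((ns.foldl PySem.Set.add vis).drop vis.length).map (fun v => (v, d + 1))) := by
  induction ns generalizing vis acc with
  | nil => simp
  | cons n ns ih =>
    simp only [List.foldl_cons]
    by_cases h : n ∈ vis
    · rw [show bfsStep d (vis, acc) n = (vis, acc) by simp [bfsStep, h]]
      rw [show PySem.Set.add vis n = vis by simp [PySem.Set.add, h]]
      exact ih vis acc
    · rw [show bfsStep d (vis, acc) n = (vis ++ [n], acc ++ [(n, d + 1)]) by simp [bfsStep, h]]
      rw [show PySem.Set.add vis n = vis ++ [n] by simp [PySem.Set.add, h]]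
      rw [ih]
      obtain ⟨t, ht⟩ := add_prefix ns (vis ++ [n])
      have h1 : (ns.foldl PySem.Set.add (vis ++ [n])).drop (vis.length + 1) = t := by
        rw [← ht]; exact List.drop_left' (by simp)
      have h2 : (ns.foldl PySem.Set.add (vis ++ [n])).drop vis.length = n :: t := by
        rw [← ht, List.append_assoc]; exact List.drop_left' rfl
      simp only [Prod.mk.injEq, true_and]
      simp only [List.length_append, List.length_cons, List.length_nil, h2]
      rw [h1]
      simp

-- strict decrease of the unvisited-universe measure, cited by loopB's termination proof
theorem measure_key (U ns vis : List String) (hU : ∀ x ∈ ns, x ∈ U) :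
    2 * ((U.filter (fun x => !((ns.foldl PySem.Set.add vis).contains x))).length)
      + ((ns.foldl PySem.Set.add vis).length - vis.length)
      ≤ 2 * ((U.filter (fun x => !(vis.contains x))).length) := by
  induction ns generalizing vis with
  | nil => simp
  | cons n ns ih =>
    simp only [List.foldl_cons]
    by_cases h : n ∈ vis
    · rw [show PySem.Set.add vis n = vis by simp [PySem.Set.add, h]]
      exact ih vis (fun x hx => hU x (List.mem_cons_of_mem _ hx))
    · rw [show PySem.Set.add vis n = vis ++ [n] by simp [PySem.Set.add, h]]
      have hn : n ∈ U := hU n (List.mem_cons_self ..)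
      have ihh := ih (vis ++ [n]) (fun x hx => hU x (List.mem_cons_of_mem _ hx))
      have hfe : U.filter (fun x => !((vis ++ [n]).contains x))
          = (U.filter (fun x => !(vis.contains x))).filter (fun x => !(x == n)) := by
        rw [List.filter_filter]
        apply List.filter_congr
        intro x _
        by_cases h1 : x ∈ vis <;> by_cases h2 : x = n <;> simp [h1, h2]
      have hmem : n ∈ U.filter (fun x => !(vis.contains x)) := by
        simp [List.mem_filter, hn, h]
      have hlt : (U.filter (fun x => !((vis ++ [n]).contains x))).length
          < (U.filter (fun x => !(vis.contains x))).length := by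
        rw [hfe]
        exact List.length_filter_lt_length_iff_exists.mpr ⟨n, hmem, by simp⟩
      have hpre := List.IsPrefix.length_le (add_prefix ns (vis ++ [n]))
      simp only [List.length_append, List.length_cons, List.length_nil] at ihh hpre ⊢
      omega

theorem getD_mem_flatMap (adj : List (String × List String)) (u v : String)
    (hv : v ∈ PySem.Dict.getD (PySem.Dict.mk adj) u []) : v ∈ adj.flatMap Prod.snd := by
  induction adj with
  | nil =>
    rw [show PySem.Dict.getD (PySem.Dict.mk ([] : List (String × List String))) u [] = [] from rfl] at hv
    cases hv
  | cons p rest ih =>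
    obtain ⟨k, vs⟩ := p
    rw [show PySem.Dict.getD (PySem.Dict.mk ((k, vs) :: rest)) u []
          = ((PySem.Dict.mk ((k, vs) :: rest)).get? u).getD [] from rfl,
        PySem.Dict.get?_mk_cons] at hv
    simp only [List.flatMap_cons, List.mem_append]
    by_cases h : k == u
    · rw [if_pos h] at hv
      exact Or.inl hv
    · rw [if_neg h] at hv
      exact Or.inr (ih hv)

def loopB (adj : List (String × List String)) (hops : Int) :
    List (String × Int) → List String → List String
  | [], vis => vis
  | (u, d) :: rest, vis =>
    if d < hops then
      let p := (PySem.Dict.getD (PySem.Dict.mk adj) u []).foldl (bfsStep d) (vis, [])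
      loopB adj hops (rest ++ p.2) p.1
    else loopB adj hops rest vis
termination_by queue vis =>
  2 * (((adj.flatMap Prod.snd).filter (fun x => !(vis.contains x))).length) + queue.length
decreasing_by
  · rw [foldl_bfsStep]
    simp only [List.length_append, List.length_map, List.length_cons, List.nil_append]
    have hk := measure_key (adj.flatMap Prod.snd)
      (PySem.Dict.getD (PySem.Dict.mk adj) u []) vis
      (fun x hx => getD_mem_flatMap adj u x hx)
    have hl : (((PySem.Dict.getD (PySem.Dict.mk adj) u []).foldl PySem.Set.add vis).drop vis.length).length
        = ((PySem.Dict.getD (PySem.Dict.mk adj) u []).foldl PySem.Set.add vis).length - vis.length := by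
      simp [List.length_drop]
    have hk' : 2 * ((((adj.flatMap Prod.snd)).filter (fun x => !(List.contains ((PySem.Dict.getD (PySem.Dict.mk adj) u []).foldl PySem.Set.add vis) x))).length)
        + (((PySem.Dict.getD (PySem.Dict.mk adj) u []).foldl PySem.Set.add vis).length - vis.length)
        ≤ 2 * (((adj.flatMap Prod.snd).filter (fun x => !(vis.contains x))).length) := hk
    omega
  · simp only [List.length_cons]
    omega

def eligible_nodes_alt (adj : List (String × List String)) (q : List String) (hops : Int) : List String :=
  let vis := PySem.Set.ofList (q.filter (fun x => !(x == "")))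
  if hops ≤ 0 then vis else loopB adj hops (vis.map (fun u => (u, 0))) vis

-- ===== PRECONDITION & SPEC =====
def Spec_eligible_nodes (adj : List (String × List String)) (q : List String) (hops : Int) (out : List String) : Prop := out = eligible_nodes_alt adj q hops
instance (adj : List (String × List String)) (q : List String) (hops : Int) (out : List String) : Decidable (Spec_eligible_nodes adj q hops out) := by unfold Spec_eligible_nodes; infer_instance

-- ===== CLAIM (what is proved, stated in full; the proofs are below) =====
def Claim_equal_eligible_nodes : Prop := ∀ (adj : List (String × List String)) (q : List String) (hops : Int), Dom_eligible_nodes adj q hops → Spec_eligible_nodes adj q hops (eligible_nodes adj q hops)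

-- ===== LEMMAS AND PROOFS =====

-- A's per-round frontier fold, with an arbitrary start set
def stepv (adj : List (String × List String)) (vis lvl : List String) : List String :=
  lvl.foldl (fun s u => PySem.Set.update s (PySem.Dict.getD (PySem.Dict.mk adj) u [])) vis

theorem stepv_flatMap (adj : List (String × List String)) (vis lvl : List String) :
    stepv adj vis lvl
      = (lvl.flatMap (fun u => PySem.Dict.getD (PySem.Dict.mk adj) u [])).foldl PySem.Set.add vis := by
  induction lvl generalizing vis with
  | nil => rfl
  | cons u lvl ih =>
    simp only [stepv, List.foldl_cons, List.flatMap_cons, List.foldl_append]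
    exact ih _

theorem foldl_add_diff (l : List String) (s vis : List String) :
    l.foldl PySem.Set.add (vis ++ PySem.Set.diff s vis)
      = vis ++ PySem.Set.diff (l.foldl PySem.Set.add s) vis := by
  induction l generalizing s with
  | nil => rfl
  | cons x l ih =>
    simp only [List.foldl_cons]
    by_cases hs : x ∈ s
    · rw [show PySem.Set.add s x = s by simp [PySem.Set.add, hs]]
      rw [show PySem.Set.add (vis ++ PySem.Set.diff s vis) x = vis ++ PySem.Set.diff s vis by
        by_cases hv : x ∈ vis
        · simp [PySem.Set.add, hv]
        · simp [PySem.Set.add, PySem.Set.diff, List.mem_filter, hs, hv]]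
      exact ih s
    · by_cases hv : x ∈ vis
      · rw [show PySem.Set.add s x = s ++ [x] by simp [PySem.Set.add, hs]]
        rw [show PySem.Set.add (vis ++ PySem.Set.diff s vis) x = vis ++ PySem.Set.diff s vis by
          simp [PySem.Set.add, hv]]
        rw [show PySem.Set.diff s vis = PySem.Set.diff (s ++ [x]) vis by
          simp [PySem.Set.diff, List.filter_append, hv]]
        exact ih (s ++ [x])
      · rw [show PySem.Set.add s x = s ++ [x] by simp [PySem.Set.add, hs]]
        rw [show PySem.Set.add (vis ++ PySem.Set.diff s vis) x
              = vis ++ PySem.Set.diff (s ++ [x]) vis by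
          simp [PySem.Set.add, PySem.Set.diff, List.mem_filter, List.filter_append, hs, hv]]
        exact ih (s ++ [x])

theorem foldl_add_eq_append_diff (l vis : List String) :
    l.foldl PySem.Set.add vis = vis ++ PySem.Set.diff (l.foldl PySem.Set.add PySem.Set.empty) vis := by
  have h := foldl_add_diff l [] vis
  rw [show PySem.Set.diff ([] : List String) vis = [] from rfl, List.append_nil] at h
  exact h

theorem diff_eq_drop (l vis : List String) :
    PySem.Set.diff (l.foldl PySem.Set.add PySem.Set.empty) vis
      = (l.foldl PySem.Set.add vis).drop vis.length := by
  rw [foldl_add_eq_append_diff l vis]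
  exact (List.drop_left' rfl).symm

theorem foldl_add_of_disjoint (D vis : List String) (hnd : D.Nodup)
    (hdis : ∀ x ∈ D, x ∉ vis) : D.foldl PySem.Set.add vis = vis ++ D := by
  induction D generalizing vis with
  | nil => simp
  | cons x D ih =>
    simp only [List.foldl_cons]
    rw [show PySem.Set.add vis x = vis ++ [x] by
      simp [PySem.Set.add, hdis x (List.mem_cons_self ..)]]
    have hdis' : ∀ y ∈ D, y ∉ vis ++ [x] := by
      intro y hy
      simp only [List.mem_append, List.mem_singleton]
      rintro (hyv | hyx)
      · exact hdis y (List.mem_cons_of_mem _ hy) hyv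
      · exact (List.nodup_cons.mp hnd).1 (hyx ▸ hy)
    rw [ih (vis ++ [x]) hnd.of_cons hdis']
    simp

theorem union_diff_eq (l vis : List String) :
    PySem.Set.union vis (PySem.Set.diff (l.foldl PySem.Set.add PySem.Set.empty) vis)
      = l.foldl PySem.Set.add vis := by
  have hnd : (PySem.Set.diff (l.foldl PySem.Set.add PySem.Set.empty) vis).Nodup :=
    List.Nodup.filter _ (PySem.Set.nodup_ofList l)
  have hdis : ∀ x ∈ PySem.Set.diff (l.foldl PySem.Set.add PySem.Set.empty) vis, x ∉ vis := by
    intro x hx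
    have := List.mem_filter.mp hx
    simpa using this.2
  rw [show PySem.Set.union vis (PySem.Set.diff (l.foldl PySem.Set.add PySem.Set.empty) vis)
        = (PySem.Set.diff (l.foldl PySem.Set.add PySem.Set.empty) vis).foldl PySem.Set.add vis from rfl]
  rw [foldl_add_of_disjoint _ vis hnd hdis]
  exact (foldl_add_eq_append_diff l vis).symm

theorem loopB_no_expand (adj : List (String × List String)) (hops : Int)
    (l : List (String × Int)) (vis : List String) (h : ∀ p ∈ l, ¬(p.2 < hops)) :
    loopB adj hops l vis = vis := by
  induction l with
  | nil => rw [loopB]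
  | cons p rest ih =>
    obtain ⟨u, d⟩ := p
    rw [loopB, if_neg (h (u, d) (List.mem_cons_self ..))]
    exact ih (fun p hp => h p (List.mem_cons_of_mem _ hp))

theorem drop_splice {a b c : List String} (h1 : a <+: b) (h2 : b <+: c) :
    c.drop a.length = (b.drop a.length) ++ (c.drop b.length) := by
  obtain ⟨s, rfl⟩ := h1
  obtain ⟨t, rfl⟩ := h2
  have e1 : ((a ++ s) ++ t).drop a.length = s ++ t := by
    rw [List.append_assoc]; exact List.drop_left' rfl
  have e2 : (a ++ s).drop a.length = s := List.drop_left' rfl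
  have e3 : ((a ++ s) ++ t).drop (a ++ s).length = t := List.drop_left' rfl
  rw [e1, e2, e3]

theorem loopB_level (adj : List (String × List String)) (hops d : Int) (hd : d < hops) :
    ∀ (lvl : List String) (acc : List (String × Int)) (vis : List String),
    loopB adj hops ((lvl.map (fun u => (u, d))) ++ acc) vis
      = loopB adj hops (acc ++ ((stepv adj vis lvl).drop vis.length).map (fun v => (v, d + 1)))
          (stepv adj vis lvl) := by
  intro lvl
  induction lvl with
  | nil =>
    intro acc vis
    rw [show stepv adj vis [] = vis from rfl]
    simp [List.drop_length]
  | cons u lvl ih =>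
    intro acc vis
    simp only [List.map_cons, List.cons_append]
    rw [loopB, if_pos hd]
    rw [foldl_bfsStep]
    simp only [List.nil_append]
    rw [List.append_assoc]
    rw [ih (acc ++ ((PySem.Dict.getD (PySem.Dict.mk adj) u []).foldl PySem.Set.add vis
          |>.drop vis.length).map (fun v => (v, d + 1)))
          ((PySem.Dict.getD (PySem.Dict.mk adj) u []).foldl PySem.Set.add vis)]
    have hst : stepv adj ((PySem.Dict.getD (PySem.Dict.mk adj) u []).foldl PySem.Set.add vis) lvl
        = stepv adj vis (u :: lvl) := rfl
    rw [hst]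
    have hp1 : vis <+: (PySem.Dict.getD (PySem.Dict.mk adj) u []).foldl PySem.Set.add vis :=
      add_prefix _ _
    have hp2 : (PySem.Dict.getD (PySem.Dict.mk adj) u []).foldl PySem.Set.add vis
        <+: stepv adj vis (u :: lvl) := by
      rw [← hst]
      rw [stepv_flatMap]
      exact add_prefix _ _
    rw [drop_splice hp1 hp2]
    simp [List.append_assoc]

theorem loopB_eq_loopA (adj : List (String × List String)) (hops : Int) (fuel : Nat) :
    ∀ (d : Int) (out frontier : List String), d + fuel = hops →
      loopB adj hops (frontier.map (fun u => (u, d))) out = loopA adj fuel out frontier := by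
  induction fuel with
  | zero =>
    intro d out frontier hdf
    rw [loopA]
    apply loopB_no_expand
    intro p hp
    simp only [List.mem_map] at hp
    obtain ⟨u, _, rfl⟩ := hp
    simp only [Nat.cast_zero, add_zero] at hdf
    omega
  | succ fuel ih =>
    intro d out frontier hdf
    have hd : d < hops := by push_cast at hdf; omega
    have hlvl := loopB_level adj hops d hd frontier [] out
    rw [List.append_nil] at hlvl
    rw [hlvl, List.nil_append]
    rw [loopA]
    have hflat := stepv_flatMap adj out frontier
    have hflat0 : (frontier.foldl (fun s u => PySem.Set.update s (PySem.Dict.getD (PySem.Dict.mk adj) u [])) PySem.Set.empty)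
        = ((frontier.flatMap (fun u => PySem.Dict.getD (PySem.Dict.mk adj) u [])).foldl PySem.Set.add PySem.Set.empty) := by
      rw [show (frontier.foldl (fun s u => PySem.Set.update s (PySem.Dict.getD (PySem.Dict.mk adj) u [])) PySem.Set.empty) = stepv adj PySem.Set.empty frontier from rfl]
      exact stepv_flatMap adj PySem.Set.empty frontier
    simp only [hflat0]
    rw [union_diff_eq, diff_eq_drop]
    by_cases he : ((frontier.flatMap (fun u => PySem.Dict.getD (PySem.Dict.mk adj) u [])).foldl PySem.Set.add out).drop out.length = []
    · rw [if_pos (by simp [he])]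
      rw [stepv_flatMap, he]
      simp only [List.map_nil]
      rw [loopB]
    · rw [if_neg (by simpa using he)]
      rw [stepv_flatMap]
      rw [ih (d + 1) _ _ (by push_cast at hdf ⊢; omega)]

-- ===== VERDICT (by name: the statement is the Claim_ definition above) =====
theorem eligible_nodes_spec : Claim_equal_eligible_nodes := by
  intro adj q hops _
  unfold Spec_eligible_nodes eligible_nodes eligible_nodes_alt
  by_cases h : hops ≤ 0
  · simp [h]
  · simp only [h, if_false]
    exact (loopB_eq_loopA adj hops hops.toNat 0 _ _ (by omega)).symm
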